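-- pv_equiv track=rewrite | github.com/Kai124816/Class-Encore-Fall | week_2/problems.py | mystery2
-- ===== SOURCE A (Python) =====
-- def mystery2(n):
--     total = 0
--     for i in range(1, n + 1):
--         if i % 2 == 0:
--             total -= i * 2
--         else:
--             total += i
--     return total
-- ===== SOURCE B (Python) =====
-- def mystery2(n):
--     # closed form: the odds sum to the square of their count; the evens contribute minus twice their triangular sum
--     if n <= 0:
--         return 0
--     e = n // 2
--     m = n - e
--     return m * m - 2 * e * (e + 1)
-- ===== Notes on version B (the rewrite author's own statement) =====
-- stated objective: faster
-- what changed: Replaced the O(n) loop over range(1,n+1) with a closed-form arithmetic formula (square of the odd count minus twice the triangular sum of the evens).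
import Mathlib
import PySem

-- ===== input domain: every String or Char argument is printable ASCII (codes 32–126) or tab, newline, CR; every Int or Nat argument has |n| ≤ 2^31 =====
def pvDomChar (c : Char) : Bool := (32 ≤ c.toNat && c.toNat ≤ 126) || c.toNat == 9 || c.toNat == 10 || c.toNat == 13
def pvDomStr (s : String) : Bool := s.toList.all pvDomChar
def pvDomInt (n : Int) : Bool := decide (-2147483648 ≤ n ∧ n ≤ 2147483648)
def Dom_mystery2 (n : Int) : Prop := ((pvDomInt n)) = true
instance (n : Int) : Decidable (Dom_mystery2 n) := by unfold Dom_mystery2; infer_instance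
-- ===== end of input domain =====

-- ===== PORT A =====
-- B replaces A's O(n) loop by a closed-form arithmetic formula (objective: faster).
def mystery2 (n : Int) : Int :=
  (PySem.List.pyRange 1 (n + 1) 1).foldl
    (fun total i => if i % 2 == 0 then total - i * 2 else total + i) 0

-- ===== PORT B =====
def mystery2_alt (n : Int) : Int :=
  if n ≤ 0 then 0
  else
    let e := PySem.Int.floordiv n 2
    let m := n - e
    m * m - 2 * e * (e + 1)

-- ===== PRECONDITION & SPEC =====
def Spec_mystery2 (n : Int) (out : Int) : Prop := out = mystery2_alt n
instance (n : Int) (out : Int) : Decidable (Spec_mystery2 n out) := by unfold Spec_mystery2; infer_instance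

-- ===== CLAIM (what is proved, stated in full; the proofs are below) =====
def Claim_equal_mystery2 : Prop := ∀ (n : Int), Dom_mystery2 n → Spec_mystery2 n (mystery2 n)

-- ===== LEMMAS AND PROOFS =====

def pvF (N : Nat) : Int :=
  ((N - N / 2 : Nat) : Int) * ((N - N / 2 : Nat) : Int)
    - 2 * ((N / 2 : Nat) : Int) * (((N / 2 : Nat) : Int) + 1)

theorem pvFoldl_range (N : Nat) (acc : Int) :
    ((List.range N).map (fun k : Nat => (1 : Int) + (k : Int))).foldl
      (fun total i => if i % 2 == 0 then total - i * 2 else total + i) acc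
    = acc + pvF N := by
  induction N generalizing acc with
  | zero => simp [pvF]
  | succ N ih =>
    rw [List.range_succ, List.map_append, List.foldl_append, ih]
    simp only [List.map_cons, List.map_nil, List.foldl_cons, List.foldl_nil]
    rcases Nat.even_or_odd N with ⟨k, hk⟩ | ⟨k, hk⟩ <;> subst hk
    · -- N = k + k, so i = 1 + N is odd
      have h2 : ¬ (((1 : Int) + ((k + k : Nat) : Int)) % 2 = 0) := by push_cast; omega
      simp only [beq_iff_eq, if_neg h2, pvF]
      have e1 : (k + k) / 2 = k := by omega
      have e2 : (k + k + 1) / 2 = k := by omega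
      have e3 : k + k - k = k := by omega
      have e4 : k + k + 1 - k = k + 1 := by omega
      rw [e1, e2, e3, e4]
      push_cast; ring
    · -- N = 2k + 1, so i = 1 + N is even
      have h2 : ((1 : Int) + ((2 * k + 1 : Nat) : Int)) % 2 = 0 := by push_cast; omega
      simp only [beq_iff_eq, if_pos h2, pvF]
      have e1 : (2 * k + 1) / 2 = k := by omega
      have e2 : (2 * k + 1 + 1) / 2 = k + 1 := by omega
      have e3 : 2 * k + 1 - k = k + 1 := by omega
      have e4 : 2 * k + 1 + 1 - (k + 1) = k + 1 := by omega
      rw [e1, e2, e3, e4]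
      push_cast; ring

-- ===== VERDICT (by name: the statement is the Claim_ definition above) =====
theorem mystery2_spec : Claim_equal_mystery2 := by
  intro n _
  unfold Spec_mystery2 mystery2 mystery2_alt
  rw [PySem.List.pyRange_one]
  have h0 : (n + 1 - 1) = n := by ring
  rw [h0]
  by_cases hn : n ≤ 0
  · have h1 : n.toNat = 0 := by omega
    simp [hn, h1]
  · have hN : (n.toNat : Int) = n := by omega
    rw [pvFoldl_range, Int.zero_add, if_neg hn]
    have hf : PySem.Int.floordiv n 2 = ((n.toNat / 2 : Nat) : Int) := by
      rw [show PySem.Int.floordiv n 2 = n.fdiv 2 from rfl, Int.fdiv_eq_ediv,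
        if_pos (Or.inl (by norm_num : (0:Int) ≤ 2))]
      omega
    have hE : ((n.toNat - n.toNat / 2 : Nat) : Int)
        = n - ((n.toNat / 2 : Nat) : Int) := by omega
    rw [pvF, hf, hE]
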